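-- pv_equiv track=rewrite | github.com/edimarzo/parcial-tecnicas-programacion | ejercicio3.py | ordenaTabla
-- ===== SOURCE A (Python) =====
-- def ordenaTabla(tablaposiciones):
--     """Recibe un diccionario desordenado con los puntajes de cada equipo.
--      Genera un listado ordenado y devuelve el líder.  En caso de que dos equipos tengan la misma cantidad de puntos devolverá el primero en orden alfabético"""
--     a = tablaposiciones.values()
--     b = []
--     for x in tablaposiciones.items():
--         b.append(x)
--     lider = []
--     for y in b:
--         if y[1] == max(a):
--             lider.append(y[0])
--     lider.sort()
--
--     return lider[0]
-- ===== SOURCE B (Python) =====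
-- def ordenaTabla(tablaposiciones):
--     """Single fold over the items keeping the running leader
--     (highest points; alphabetically first name on ties)."""
--     best = None
--     for name, pts in tablaposiciones.items():
--         if best is None or pts > best[1] or (pts == best[1] and name < best[0]):
--             best = (name, pts)
--     return best[0]
-- ===== Notes on version B (the rewrite author's own statement) =====
-- stated objective: faster
-- what changed: Replaced the max-per-iteration rescan + filter + sort pipeline by a single fold over the items that keeps the running best (highest points, alphabetically smallest name on ties), with no list building and no sort.
-- outside the precondition, e.g. on ordenaTabla({}): A raises IndexError, B raises TypeError
import Mathlib
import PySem

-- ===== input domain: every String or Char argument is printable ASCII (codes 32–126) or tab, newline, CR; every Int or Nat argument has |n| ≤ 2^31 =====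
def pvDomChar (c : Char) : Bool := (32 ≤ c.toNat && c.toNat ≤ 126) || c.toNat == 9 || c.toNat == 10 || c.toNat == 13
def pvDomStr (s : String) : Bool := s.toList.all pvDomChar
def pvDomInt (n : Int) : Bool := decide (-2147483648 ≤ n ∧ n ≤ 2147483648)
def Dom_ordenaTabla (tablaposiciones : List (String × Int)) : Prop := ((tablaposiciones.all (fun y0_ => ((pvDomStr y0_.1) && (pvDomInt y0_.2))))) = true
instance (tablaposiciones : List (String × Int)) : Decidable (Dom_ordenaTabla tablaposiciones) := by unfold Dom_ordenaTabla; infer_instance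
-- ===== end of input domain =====

-- B replaces A's per-iteration max rescan + filter + sort by one fold keeping the running leader (objective: faster).

-- ===== PORT A =====
def ordenaTabla (tablaposiciones : List (String × Int)) : String :=
  let a := tablaposiciones.map (fun kv => kv.2)
  let b := tablaposiciones.foldl (fun acc x => acc ++ [x]) []
  let lider := b.foldl (fun acc y =>
    if PySem.List.max? a (fun v => v) = some y.2 then acc ++ [y.1] else acc) []
  let lider := PySem.List.sorted lider (fun x => x) false
  ((PySem.List.pyGet? lider 0).getD "")   -- lider[0]; none = IndexError, excluded by Pre_

-- ===== PORT B =====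
def ordenaTabla_alt (tablaposiciones : List (String × Int)) : String :=
  let best := tablaposiciones.foldl (fun best y =>
    match best with
    | none => some y
    | some b => if y.2 > b.2 ∨ (y.2 = b.2 ∧ y.1 < b.1) then some y else some b) none
  match best with
  | some b => b.1
  | none => ""   -- best is None: Python B raises TypeError here, excluded by Pre_

-- ===== PRECONDITION & SPEC =====
-- Pre_ excludes only the empty dict, on which Python A raises IndexError (and B TypeError).
def Pre_ordenaTabla (tablaposiciones : List (String × Int)) : Prop := tablaposiciones ≠ []
instance (tablaposiciones : List (String × Int)) : Decidable (Pre_ordenaTabla tablaposiciones) := by unfold Pre_ordenaTabla; infer_instance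
def pvWitness_ordenaTabla : (List (String × Int)) := [("a", 1)]
def Spec_ordenaTabla (tablaposiciones : List (String × Int)) (out : String) : Prop := out = ordenaTabla_alt tablaposiciones
instance (tablaposiciones : List (String × Int)) (out : String) : Decidable (Spec_ordenaTabla tablaposiciones out) := by unfold Spec_ordenaTabla; infer_instance

-- ===== CLAIM (what is proved, stated in full; the proofs are below) =====
def Claim_equal_ordenaTabla : Prop := ∀ (tablaposiciones : List (String × Int)), Dom_ordenaTabla tablaposiciones → Pre_ordenaTabla tablaposiciones → Spec_ordenaTabla tablaposiciones (ordenaTabla tablaposiciones)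

-- ===== LEMMAS AND PROOFS =====

-- B's update step, unwrapped from the Option accumulator
def pvUpd (b y : String × Int) : String × Int :=
  if y.2 > b.2 ∨ (y.2 = b.2 ∧ y.1 < b.1) then y else b

lemma pv_fold_some (t : List (String × Int)) (b : String × Int) :
    t.foldl (fun best y =>
      match best with
      | none => some y
      | some b => if y.2 > b.2 ∨ (y.2 = b.2 ∧ y.1 < b.1) then some y else some b)
      (some b) = some (t.foldl pvUpd b) := by
  induction t generalizing b with
  | nil => rfl
  | cons z t ih =>
    simp only [List.foldl_cons]
    rw [show (if z.2 > b.2 ∨ (z.2 = b.2 ∧ z.1 < b.1) then some z else some b)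
        = some (pvUpd b z) by unfold pvUpd; split_ifs <;> rfl]
    exact ih (pvUpd b z)

lemma pv_fold_none (x : String × Int) (t : List (String × Int)) :
    (x :: t).foldl (fun best y =>
      match best with
      | none => some y
      | some b => if y.2 > b.2 ∨ (y.2 = b.2 ∧ y.1 < b.1) then some y else some b)
      none = some (t.foldl pvUpd x) := by
  simp only [List.foldl_cons]
  exact pv_fold_some t x

lemma pv_fold_spec (t : List (String × Int)) (b : String × Int) :
    (t.foldl pvUpd b ∈ b :: t)
    ∧ (∀ y ∈ b :: t, y.2 ≤ (t.foldl pvUpd b).2)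
    ∧ (∀ y ∈ b :: t, y.2 = (t.foldl pvUpd b).2 → (t.foldl pvUpd b).1 ≤ y.1) := by
  induction t generalizing b with
  | nil =>
    refine ⟨List.mem_singleton.mpr rfl, ?_, ?_⟩ <;>
      intro y hy <;> simp at hy <;> simp [hy]
  | cons z t ih =>
    obtain ⟨ihm, ihmax, ihmin⟩ := ih (pvUpd b z)
    have hmem : pvUpd b z = b ∨ pvUpd b z = z := by
      unfold pvUpd; split_ifs <;> simp
    have hble : b.2 ≤ (pvUpd b z).2 ∧ z.2 ≤ (pvUpd b z).2 := by
      unfold pvUpd; split_ifs with h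
      · rcases h with h | ⟨h, _⟩ <;> constructor <;> omega
      · push Not at h; constructor <;> omega
    have htie : (b.2 = (pvUpd b z).2 → (pvUpd b z).1 ≤ b.1)
        ∧ (z.2 = (pvUpd b z).2 → (pvUpd b z).1 ≤ z.1) := by
      unfold pvUpd; split_ifs with h
      · refine ⟨fun hb => ?_, fun _ => le_refl _⟩
        rcases h with h | ⟨_, h⟩
        · exact absurd hb (by omega)
        · exact le_of_lt h
      · push Not at h
        exact ⟨fun _ => le_refl _, fun hz => not_lt.mp (h.2 hz)⟩
    have hpu_le : (pvUpd b z).2 ≤ (t.foldl pvUpd (pvUpd b z)).2 :=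
      ihmax _ List.mem_cons_self
    simp only [List.foldl_cons]
    refine ⟨?_, ?_, ?_⟩
    · rcases List.mem_cons.mp ihm with h | h
      · rw [h]; rcases hmem with h' | h' <;> rw [h'] <;> simp
      · exact List.mem_cons_of_mem _ (List.mem_cons_of_mem _ h)
    · intro y hy
      rcases List.mem_cons.mp hy with rfl | hy'
      · exact le_trans hble.1 hpu_le
      rcases List.mem_cons.mp hy' with rfl | hy''
      · exact le_trans hble.2 hpu_le
      · exact ihmax y (List.mem_cons_of_mem _ hy'')
    · intro y hy hyeq
      rcases List.mem_cons.mp hy with rfl | hy'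
      · -- y = b
        have hpu2 : (pvUpd y z).2 = (t.foldl pvUpd (pvUpd y z)).2 := by
          have h1 := hble.1; omega
        have hb2 : y.2 = (pvUpd y z).2 := by have h1 := hble.1; omega
        exact le_trans (ihmin _ List.mem_cons_self hpu2) (htie.1 hb2)
      rcases List.mem_cons.mp hy' with rfl | hy''
      · -- y = z
        have hpu2 : (pvUpd b y).2 = (t.foldl pvUpd (pvUpd b y)).2 := by
          have h1 := hble.2; omega
        have hz2 : y.2 = (pvUpd b y).2 := by have h1 := hble.2; omega
        exact le_trans (ihmin _ List.mem_cons_self hpu2) (htie.2 hz2)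
      · exact ihmin y (List.mem_cons_of_mem _ hy'') hyeq

theorem ordenaTabla_spec : Claim_equal_ordenaTabla := by
  intro l _ hpre
  unfold Spec_ordenaTabla
  obtain ⟨x, t, rfl⟩ := List.exists_cons_of_ne_nil hpre
  set r := t.foldl pvUpd x with hr
  have hB : ordenaTabla_alt (x :: t) = r.1 := by
    unfold ordenaTabla_alt
    rw [pv_fold_none]
  rw [hB]
  obtain ⟨hrmem, hrmax, hrtie⟩ := pv_fold_spec t x
  rw [← hr] at hrmem hrmax hrtie
  simp only [ordenaTabla]
  -- A side
  set a := (x :: t).map (fun kv => kv.2) with ha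
  have hane : a ≠ [] := by simp [ha]
  obtain ⟨M, hM⟩ : ∃ M, PySem.List.max? a (fun v => v) = some M := by
    cases h : PySem.List.max? a (fun v => v) with
    | none => exact absurd ((PySem.List.max?_eq_none_iff a (fun v => v)).mp h) hane
    | some m => exact ⟨m, rfl⟩
  have hMisMax : ∀ v ∈ a, v ≤ M := fun v hv => PySem.List.max?_isMax hM v hv
  have hMmem : M ∈ a := PySem.List.max?_mem hM
  have hr2 : r.2 = M := by
    refine le_antisymm (hMisMax _ ?_) ?_
    · rw [ha]; exact List.mem_map_of_mem hrmem
    · rw [ha] at hMmem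
      obtain ⟨y, hy, hy2⟩ := List.mem_map.mp hMmem
      rw [← hy2]; exact hrmax y hy
  rw [PySem.List.foldl_append_singleton_eq_self, List.nil_append]
  have hfilter := PySem.List.foldl_append_ite
    (fun y : String × Int => PySem.List.max? a (fun v => v) = some y.2)
    (fun y : String × Int => y.1) (x :: t) ([] : List String)
  rw [hfilter, List.nil_append]
  set lider := ((x :: t).filter fun y => decide (PySem.List.max? a (fun v => v) = some y.2)).map
    (fun y => y.1) with hl
  have hmemlider : ∀ s, s ∈ lider ↔ ∃ y ∈ x :: t, y.2 = M ∧ y.1 = s := by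
    intro s
    rw [hl]
    simp only [List.mem_map, List.mem_filter, decide_eq_true_eq, hM, Option.some_inj]
    constructor
    · rintro ⟨y, ⟨hy, hM2⟩, rfl⟩; exact ⟨y, hy, hM2.symm, rfl⟩
    · rintro ⟨y, hy, hM2, rfl⟩; exact ⟨y, ⟨hy, hM2.symm⟩, rfl⟩
  have hr1lider : r.1 ∈ lider := (hmemlider r.1).mpr ⟨r, hrmem, hr2, rfl⟩
  have hlne : lider ≠ [] := fun h => by rw [h] at hr1lider; exact absurd hr1lider (List.not_mem_nil)
  obtain ⟨m, rest, hsorted⟩ : ∃ m rest, PySem.List.sorted lider (fun s => s) false = m :: rest := by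
    cases h : PySem.List.sorted lider (fun s => s) false with
    | nil => exact absurd ((PySem.List.sorted_eq_nil_iff lider (fun s => s) false).mp h) hlne
    | cons m rest => exact ⟨m, rest, rfl⟩
  rw [hsorted]
  have hres : PySem.List.pyGet? (m :: rest) (0 : Int) = some m := by
    simp [PySem.List.pyGet?, PySem.List.pyIdx?]
  rw [hres]
  have hmle : ∀ s ∈ lider, m ≤ s := PySem.List.key_head_sorted_le _ _ hsorted
  have hmmem : m ∈ lider := by
    have := PySem.List.mem_sorted lider (fun s => s) false m
    rw [hsorted] at this
    exact this.mp List.mem_cons_self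
  obtain ⟨y, hy, hy2, hy1⟩ := (hmemlider m).mp hmmem
  have h1 : r.1 ≤ m := by
    rw [← hy1]; exact hrtie y hy (by rw [hy2, hr2])
  have h2 : m ≤ r.1 := hmle _ hr1lider
  simp only [Option.getD_some]
  exact le_antisymm h2 h1
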